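-- pv_equiv track=rewrite | github.com/OUYANGZhe21191694/Independent-Project-Codes | R2T.py | _geom_grid
-- ===== SOURCE A (Python) =====
-- from typing import List, Literal, Dict, Any, Tuple, Optional
--
-- def _geom_grid(gs_q: int) -> List[int]:
--     #construct a geometric grid of candidate truncation thresholds (tau values)
--     #the grid is descending and includes gs_q explicitly as a candidate
--     if gs_q < 1:
--         raise ValueError("GS_Q must be >= 1.")
--     vals = []
--     v = 1
--     while v <= gs_q:
--         vals.append(v)
--         v <<= 1
--     if vals[-1] != gs_q:
--         vals.append(gs_q)
--     vals = sorted(set(vals), reverse=True)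
--     return vals
-- ===== SOURCE B (Python) =====
-- def _geom_grid(gs_q: int):
--     # Descending construction: start from gs_q, then walk powers of two downward.
--     if gs_q < 1:
--         raise ValueError("GS_Q must be >= 1.")
--     vals = [gs_q]
--     v = 1 << (gs_q.bit_length() - 1)
--     while v >= 1:
--         if v != gs_q:
--             vals.append(v)
--         v >>= 1
--     return vals
-- ===== Notes on version B (the rewrite author's own statement) =====
-- stated objective: simpler
-- what changed: B emits the grid directly in descending order, starting from gs_q and the largest power of two <= gs_q obtained from bit_length, halving downward; the ascending-doubling loop, the set() dedup and the sorted(..., reverse=True) pass of A all disappear.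
import Mathlib
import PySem

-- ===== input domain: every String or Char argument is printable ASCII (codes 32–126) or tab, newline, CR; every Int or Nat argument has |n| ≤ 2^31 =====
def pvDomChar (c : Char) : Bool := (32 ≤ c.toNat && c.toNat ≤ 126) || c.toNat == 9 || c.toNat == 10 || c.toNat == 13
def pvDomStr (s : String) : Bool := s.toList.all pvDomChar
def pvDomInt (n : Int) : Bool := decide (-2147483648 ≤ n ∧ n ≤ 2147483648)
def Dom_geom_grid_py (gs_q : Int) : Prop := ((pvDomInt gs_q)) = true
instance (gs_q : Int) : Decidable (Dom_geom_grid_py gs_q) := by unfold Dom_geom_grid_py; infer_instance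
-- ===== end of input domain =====

-- B builds the grid directly in descending order from gs_q (via bit_length), so A's set() dedup and sorted() pass disappear: simpler decomposition, same values.

-- ===== PORT A =====
-- 'v = 1; while v <= gs_q: vals.append(v); v <<= 1' — fuel makes the loop total (gs_q < 2^(gs_q.toNat+1), so fuel gs_q.toNat+1 always suffices)
def geomLoopA (fuel : Nat) (gs_q v : Int) (vals : List Int) : List Int :=
  match fuel with
  | 0 => vals
  | f + 1 => if v ≤ gs_q then geomLoopA f gs_q (v <<< (1 : Nat)) (vals ++ [v]) else vals

def geom_grid_py (gs_q : Int) : List Int :=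
  if gs_q < 1 then []  -- Python raises ValueError("GS_Q must be >= 1.") here; excluded by Pre_
  else
    let vals := geomLoopA (gs_q.toNat + 1) gs_q 1 []
    let vals' := if PySem.List.pyGet? vals (-1) ≠ some gs_q then vals ++ [gs_q] else vals
    PySem.List.sorted (PySem.Set.ofList vals') (fun x => x) true

-- ===== PORT B =====
-- 'while v >= 1: (append v if v != gs_q); v >>= 1'
def geomLoopB (gs_q v : Int) (vals : List Int) : List Int :=
  if _h : 1 ≤ v then
    geomLoopB gs_q (PySem.Int.floordiv v 2) (if v ≠ gs_q then vals ++ [v] else vals)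
  else vals
termination_by v.toNat
decreasing_by
  rw [PySem.Int.floordiv_eq_ediv_of_pos (by omega)]
  omega

def geom_grid_py_alt (gs_q : Int) : List Int :=
  if gs_q < 1 then []  -- Python raises ValueError("GS_Q must be >= 1.") here; excluded by Pre_
  else
    let v : Int := (1 : Int) <<< (PySem.Int.bitLength gs_q - 1)
    geomLoopB gs_q v [gs_q]

-- ===== PRECONDITION & SPEC =====
-- A raises ValueError exactly when gs_q < 1; Pre_ excludes only those inputs (B raises there too).
def Pre_geom_grid_py (gs_q : Int) : Prop := 1 ≤ gs_q
instance (gs_q : Int) : Decidable (Pre_geom_grid_py gs_q) := by unfold Pre_geom_grid_py; infer_instance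
def pvWitness_geom_grid_py : Int := (5)

def Spec_geom_grid_py (gs_q : Int) (out : List Int) : Prop := out = geom_grid_py_alt gs_q
instance (gs_q : Int) (out : List Int) : Decidable (Spec_geom_grid_py gs_q out) := by unfold Spec_geom_grid_py; infer_instance

-- ===== CLAIM (what is proved, stated in full; the proofs are below) =====
def Claim_equal_geom_grid_py : Prop := ∀ (gs_q : Int), Dom_geom_grid_py gs_q → Pre_geom_grid_py gs_q → Spec_geom_grid_py gs_q (geom_grid_py gs_q)

-- ===== LEMMAS AND PROOFS =====

-- [2^k, 2^(k-1), …, 2, 1]: the descending power-of-two list both programs produce (up to the gs_q entry)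
def descPows : Nat → List Int
  | 0 => [1]
  | k + 1 => (2 ^ (k + 1) : Int) :: descPows k

def ascPows (k : Nat) : List Int := (List.range (k + 1)).map (fun j => (2 : Int) ^ j)

theorem mem_descPows {x : Int} {k : Nat} : x ∈ descPows k ↔ ∃ j ≤ k, x = 2 ^ j := by
  induction k with
  | zero =>
    constructor
    · intro h; exact ⟨0, le_refl 0, by simpa [descPows] using h⟩
    · rintro ⟨j, hj, rfl⟩; simp [Nat.le_zero.mp hj, descPows]
  | succ k ih =>
    simp only [descPows, List.mem_cons, ih]
    constructor
    · rintro (rfl | ⟨j, hj, rfl⟩)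
      · exact ⟨k + 1, le_refl _, rfl⟩
      · exact ⟨j, Nat.le_succ_of_le hj, rfl⟩
    · rintro ⟨j, hj, rfl⟩
      rcases Nat.lt_or_ge j (k + 1) with h | h
      · exact Or.inr ⟨j, Nat.lt_succ_iff.mp h, rfl⟩
      · left; have : j = k + 1 := by omega
        rw [this]

theorem descPows_le {x : Int} {k : Nat} (h : x ∈ descPows k) : x ≤ 2 ^ k := by
  obtain ⟨j, hj, rfl⟩ := mem_descPows.mp h
  exact pow_le_pow_right₀ (by norm_num) hj

theorem ascPows_reverse (k : Nat) : (ascPows k).reverse = descPows k := by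
  induction k with
  | zero => rfl
  | succ k ih =>
    show ((List.range (k + 2)).map (fun j => (2 : Int) ^ j)).reverse = _
    rw [List.range_succ, List.map_append, List.reverse_append]
    simp only [List.map_cons, List.map_nil, List.reverse_cons, List.reverse_nil, List.nil_append]
    rw [descPows]
    exact congrArg _ ih

theorem descPows_pairwise (k : Nat) : (descPows k).Pairwise (fun a b => b < a) := by
  induction k with
  | zero => simp [descPows]
  | succ k ih =>
    rw [descPows]
    refine List.Pairwise.cons (fun x hx => ?_) ih
    have := descPows_le hx
    have : (2 : Int) ^ k < 2 ^ (k + 1) := by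
      rw [pow_succ]; nlinarith [pow_pos (by norm_num : (0:Int) < 2) k]
    omega

theorem ascPows_nodup (k : Nat) : (ascPows k).Nodup := by
  have : (descPows k).Nodup := (descPows_pairwise k).imp (fun h => by omega)
  rw [← ascPows_reverse] at this
  exact List.nodup_reverse.mp this

theorem pow_shift (i : Nat) : ((2 : Int) ^ i) <<< (1 : Nat) = 2 ^ (i + 1) := by
  rw [Int.shiftLeft_eq]
  rw [pow_succ 2 i]
  norm_num

theorem loopA_stop (fuel : Nat) (g v : Int) (vals : List Int) (h : ¬ v ≤ g) :
    geomLoopA fuel g v vals = vals := by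
  cases fuel <;> simp [geomLoopA, h]

theorem loopA_eq (g : Int) (k : Nat) (hg : (2 : Int) ^ k ≤ g) (hlt : g < 2 ^ (k + 1)) :
    ∀ (fuel i : Nat) (vals : List Int), i ≤ k → g < 2 ^ (i + fuel) →
      geomLoopA fuel g (2 ^ i) vals
        = vals ++ (List.range' i (k + 1 - i)).map (fun j => (2 : Int) ^ j) := by
  intro fuel
  induction fuel with
  | zero =>
    intro i vals hik hf
    exfalso
    have h1 : (2 : Int) ^ i ≤ 2 ^ k := pow_le_pow_right₀ (by norm_num) hik
    simp only [Nat.add_zero] at hf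
    omega
  | succ f ih =>
    intro i vals hik hf
    have h1 : (2 : Int) ^ i ≤ g := le_trans (pow_le_pow_right₀ (by norm_num) hik) hg
    rw [geomLoopA, if_pos h1, pow_shift]
    have hrange : List.range' i (k + 1 - i) = i :: List.range' (i + 1) (k - i) := by
      have : k + 1 - i = (k - i) + 1 := by omega
      rw [this, List.range'_succ]
    rcases Nat.lt_or_ge i k with hik' | hik'
    · rw [ih (i + 1) (vals ++ [2 ^ i]) (by omega) (by rw [show i + 1 + f = i + (f + 1) by omega]; exact hf)]
      rw [hrange]
      simp
    · have hik2 : i = k := by omega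
      rw [loopA_stop _ _ _ _ (by rw [hik2]; omega)]
      rw [hrange, show k - i = 0 by omega]
      simp
theorem loopB_eq (g : Int) : ∀ (i : Nat) (acc : List Int),
    geomLoopB g (2 ^ i) acc = acc ++ (descPows i).filter (fun x => x ≠ g) := by
  intro i
  induction i with
  | zero =>
    intro acc
    rw [geomLoopB]
    rw [dif_pos (by norm_num)]
    have hd : PySem.Int.floordiv ((2:Int) ^ 0) 2 = 0 := by decide
    rw [hd, geomLoopB, dif_neg (by norm_num)]
    by_cases h : (1 : Int) = g <;> simp [descPows, h]
  | succ i ih =>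
    intro acc
    rw [geomLoopB]
    have hpos : (1 : Int) ≤ 2 ^ (i + 1) := by
      have := pow_pos (by norm_num : (0:Int) < 2) (i + 1)
      omega
    rw [dif_pos hpos]
    have hd : PySem.Int.floordiv ((2:Int) ^ (i + 1)) 2 = 2 ^ i := by
      rw [PySem.Int.floordiv_eq_ediv_of_pos (by norm_num), pow_succ]
      exact Int.mul_ediv_cancel _ (by norm_num)
    rw [hd, ih]
    rw [show descPows (i + 1) = ((2:Int) ^ (i + 1)) :: descPows i from rfl]
    by_cases h : (2 : Int) ^ (i + 1) = g <;> simp [h]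

-- 2^(bitLength g - 1) ≤ g < 2^(bitLength g), as Int facts, for 1 ≤ g
theorem bitLength_bounds (g : Int) (hg : 1 ≤ g) :
    (2 : Int) ^ (PySem.Int.bitLength g - 1) ≤ g ∧ g < 2 ^ ((PySem.Int.bitLength g - 1) + 1) := by
  have habs : (g.natAbs : Int) = g := Int.natAbs_of_nonneg (by omega)
  have h1 : 2 ^ (PySem.Int.bitLength g - 1) ≤ g.natAbs := PySem.Int.two_pow_bitLength_le g (by omega)
  have h2 : g.natAbs < 2 ^ PySem.Int.bitLength g := PySem.Int.lt_two_pow_bitLength g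
  have hbl : 1 ≤ PySem.Int.bitLength g := by
    by_contra h
    have : PySem.Int.bitLength g = 0 := by omega
    rw [this] at h2
    omega
  constructor
  · calc (2 : Int) ^ (PySem.Int.bitLength g - 1) = ((2 ^ (PySem.Int.bitLength g - 1) : Nat) : Int) := by push_cast; ring
      _ ≤ (g.natAbs : Int) := by exact_mod_cast h1
      _ = g := habs
  · calc g = (g.natAbs : Int) := habs.symm
      _ < ((2 ^ PySem.Int.bitLength g : Nat) : Int) := by exact_mod_cast h2
      _ = 2 ^ ((PySem.Int.bitLength g - 1) + 1) := by rw [show PySem.Int.bitLength g - 1 + 1 = PySem.Int.bitLength g by omega]; push_cast; ring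

theorem descPows_filter_self (g : Int) (k : Nat) (h : (2:Int) ^ k < g) :
    (descPows k).filter (fun x => x ≠ g) = descPows k := by
  apply List.filter_eq_self.mpr
  intro x hx
  have := descPows_le hx
  simp only [ne_eq, decide_eq_true_eq]
  omega

theorem geom_grid_py_spec : Claim_equal_geom_grid_py := by
  unfold Claim_equal_geom_grid_py
  intro g _ hpre
  unfold Spec_geom_grid_py
  have hg1 : 1 ≤ g := hpre
  have hcond : ¬ g < 1 := by omega
  obtain ⟨hlow, hhigh⟩ := bitLength_bounds g hg1
  -- the B side: g followed by descending powers other than g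
  have hB : geom_grid_py_alt g = g :: (descPows (PySem.Int.bitLength g - 1)).filter (fun x => x ≠ g) := by
    unfold geom_grid_py_alt
    rw [if_neg hcond]
    rw [show (1 : Int) <<< (PySem.Int.bitLength g - 1) = 2 ^ (PySem.Int.bitLength g - 1) by
      rw [Int.shiftLeft_eq, one_mul]]
    rw [loopB_eq]
    rfl
  set k : Nat := PySem.Int.bitLength g - 1 with hk
  clear_value k
  -- the A-side loop value
  have hfuel : g < 2 ^ (0 + (g.toNat + 1)) := by
    have h1 : g.toNat < 2 ^ g.toNat := Nat.lt_two_pow_self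
    have h3 : (g.toNat : Int) < ((2 ^ g.toNat : Nat) : Int) := by exact_mod_cast h1
    have h2 : ((2:Nat) ^ g.toNat : Int) ≤ ((2 ^ (g.toNat + 1) : Nat) : Int) := by
      exact_mod_cast Nat.pow_le_pow_right (by norm_num) (by omega)
    have hgt : g = (g.toNat : Int) := (Int.toNat_of_nonneg (by omega)).symm
    push_cast at h3 h2 ⊢
    simp only [Nat.zero_add]
    omega
  have hA : geomLoopA (g.toNat + 1) g 1 [] = ascPows k := by
    have := loopA_eq g k hlow hhigh (g.toNat + 1) 0 [] (Nat.zero_le _) hfuel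
    simpa [ascPows, List.range_eq_range'] using this
  have hlast : PySem.List.pyGet? (ascPows k) (-1) = some (2 ^ k) := by
    rw [PySem.List.pyGet?_neg_one, List.getLast?_eq_head?_reverse, ascPows_reverse]
    cases k <;> simp [descPows]
  unfold geom_grid_py
  rw [if_neg hcond]
  simp only [hA, hlast, hB]
  by_cases heq : (2 : Int) ^ k = g
  · -- gs_q is a power of two: no extra append, the result is descPows k
    rw [if_neg (by simp [heq])]
    rw [PySem.Set.ofList_eq_self_of_nodup _ (ascPows_nodup k)]
    rw [PySem.List.sorted_rev_eq_of_perm_of_pairwise_gt (ascPows k) (descPows k) (fun x => x)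
      (by rw [← ascPows_reverse]; exact (List.reverse_perm _)) (descPows_pairwise k)]
    cases k with
    | zero =>
      have hg : g = 1 := by simpa using heq.symm
      subst hg
      simp [descPows]
    | succ k =>
      rw [show descPows (k + 1) = ((2:Int) ^ (k + 1)) :: descPows k from rfl]
      rw [List.filter_cons, if_neg (by simp [heq])]
      rw [heq]
      congr 1
      symm
      apply descPows_filter_self
      have hss : (2 : Int) ^ k < 2 ^ (k + 1) := by
        rw [pow_succ]
        nlinarith [pow_pos (by norm_num : (0:Int) < 2) k]
      omega
  · -- gs_q is not a power of two: gs_q is appended; 2^k < gs_q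
    have hlt' : (2 : Int) ^ k < g := lt_of_le_of_ne hlow heq
    rw [if_pos (by simpa using heq)]
    have hnodup : (ascPows k ++ [g]).Nodup := by
      rw [List.nodup_append]
      refine ⟨ascPows_nodup k, List.nodup_singleton g, ?_⟩
      intro x hx y hy
      have hy' : y = g := by simpa using hy
      have hmem : x ∈ descPows k := by
        rw [← ascPows_reverse, List.mem_reverse]; exact hx
      have := descPows_le hmem
      omega
    rw [PySem.Set.ofList_eq_self_of_nodup _ hnodup]
    have hperm : (g :: descPows k).Perm (ascPows k ++ [g]) :=
      (List.Perm.cons g (by rw [← ascPows_reverse]; exact List.reverse_perm _)).trans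
        (List.perm_append_singleton g (ascPows k)).symm
    have hpw : (g :: descPows k).Pairwise (fun a b => b < a) :=
      List.Pairwise.cons (fun x hx => by have := descPows_le hx; omega) (descPows_pairwise k)
    rw [PySem.List.sorted_rev_eq_of_perm_of_pairwise_gt _ (g :: descPows k) (fun x => x) hperm hpw]
    rw [descPows_filter_self g k hlt']
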